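-- pv_equiv track=rewrite | github.com/tailaiying32/ROMA-Active-Learning | CaregivingLM/scone/muscle_anatomy_config.py | get_antagonist_muscles
-- ===== SOURCE A (Python) =====
-- from typing import Dict, List, Tuple, Set
--
-- SYNERGY_GROUPS = {
--     'scapular_retractors': ['rhom_s_r', 'rhom_i_r', 'trap_scap_m_r'],
--     'scapular_protractors': ['ser_ant_i_r', 'ser_ant_m_r', 'ser_ant_s_r'],
--     'scapular_elevators': ['trap_scap_s_r', 'lev_scap_r'],
--     'scapular_depressors': ['trap_scap_i_r', 'lat_dors_i_r'],
--     'shoulder_flexors': ['delt_clav_a_r', 'pect_maj_clav_s_r', 'coracobrach_r'],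
--     'shoulder_extensors': ['delt_scap_p_r', 'lat_dors_m_r', 'lat_dors_i_r', 'teres_maj_r'],
--     'shoulder_abductors': ['delt_scap_m_r', 'supraspi_r'],
--     'shoulder_adductors': ['pect_maj_thorax_m_r', 'lat_dors_m_r', 'teres_maj_r'],
--     'shoulder_internal_rotators': ['subscap_s_r', 'subscap_i_r', 'lat_dors_m_r', 'teres_maj_r'],
--     'shoulder_external_rotators': ['infraspi_i_r', 'infraspi_s_r', 'teres_min_r'],
--     'elbow_flexors': ['bic_long_r', 'bic_brev_r', 'brach_r', 'brachiorad_r'],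
--     'elbow_extensors': ['tri_long_r', 'tri_lat_r'],
--     'forearm_supinators': ['supinator_r', 'bic_long_r', 'bic_brev_r'],
--     'forearm_pronators': ['pronator_teres_r'],
--     'wrist_extensors': ['ext_carpi_rad_long_r', 'ext_carpi_rad_brev_r', 'ext_carpi_ulna_r'],
--     'wrist_flexors': ['flex_carpi_rad_r', 'flex_carpi_ulna_r']
-- }
--
-- ANTAGONIST_PAIRS = [
--     ('scapular_retractors', 'scapular_protractors'),
--     ('scapular_elevators', 'scapular_depressors'),
--     ('shoulder_flexors', 'shoulder_extensors'),
--     ('shoulder_abductors', 'shoulder_adductors'),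
--     ('shoulder_internal_rotators', 'shoulder_external_rotators'),
--     ('elbow_flexors', 'elbow_extensors'),
--     ('forearm_supinators', 'forearm_pronators'),
--     ('wrist_extensors', 'wrist_flexors')
-- ]
--
-- def get_antagonist_muscles(muscle_name: str) -> List[str]:
--     """Get muscles that are antagonistic to the given muscle."""
--     antagonistic = []
--
--     # Find which synergy group this muscle belongs to
--     muscle_groups = []
--     for group, muscles in SYNERGY_GROUPS.items():
--         if muscle_name in muscles:
--             muscle_groups.append(group)
--
--     # Find antagonist groups
--     for group in muscle_groups:
--         for pair in ANTAGONIST_PAIRS: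
--             if group == pair[0]:
--                 if pair[1] in SYNERGY_GROUPS:
--                     antagonistic.extend(SYNERGY_GROUPS[pair[1]])
--             elif group == pair[1]:
--                 if pair[0] in SYNERGY_GROUPS:
--                     antagonistic.extend(SYNERGY_GROUPS[pair[0]])
--
--     return list(set(antagonistic))
-- ===== SOURCE B (Python) =====
-- from typing import Dict, List
--
-- # The anatomy data is static, so the antagonist relation is stated directly as a
-- # flat muscle -> antagonists table instead of being re-derived from the synergy
-- # groups and pair list on every call.
-- ANTAGONISTS: Dict[str, List[str]] = {
--     'rhom_s_r': ['ser_ant_i_r', 'ser_ant_m_r', 'ser_ant_s_r'],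
--     'rhom_i_r': ['ser_ant_i_r', 'ser_ant_m_r', 'ser_ant_s_r'],
--     'trap_scap_m_r': ['ser_ant_i_r', 'ser_ant_m_r', 'ser_ant_s_r'],
--     'ser_ant_i_r': ['rhom_s_r', 'rhom_i_r', 'trap_scap_m_r'],
--     'ser_ant_m_r': ['rhom_s_r', 'rhom_i_r', 'trap_scap_m_r'],
--     'ser_ant_s_r': ['rhom_s_r', 'rhom_i_r', 'trap_scap_m_r'],
--     'trap_scap_s_r': ['trap_scap_i_r', 'lat_dors_i_r'],
--     'lev_scap_r': ['trap_scap_i_r', 'lat_dors_i_r'],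
--     'trap_scap_i_r': ['trap_scap_s_r', 'lev_scap_r'],
--     'lat_dors_i_r': ['trap_scap_s_r', 'lev_scap_r', 'delt_clav_a_r', 'pect_maj_clav_s_r', 'coracobrach_r'],
--     'delt_clav_a_r': ['delt_scap_p_r', 'lat_dors_m_r', 'lat_dors_i_r', 'teres_maj_r'],
--     'pect_maj_clav_s_r': ['delt_scap_p_r', 'lat_dors_m_r', 'lat_dors_i_r', 'teres_maj_r'],
--     'coracobrach_r': ['delt_scap_p_r', 'lat_dors_m_r', 'lat_dors_i_r', 'teres_maj_r'],
--     'delt_scap_p_r': ['delt_clav_a_r', 'pect_maj_clav_s_r', 'coracobrach_r'],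
--     'lat_dors_m_r': ['delt_clav_a_r', 'pect_maj_clav_s_r', 'coracobrach_r', 'delt_scap_m_r', 'supraspi_r', 'infraspi_i_r', 'infraspi_s_r', 'teres_min_r'],
--     'teres_maj_r': ['delt_clav_a_r', 'pect_maj_clav_s_r', 'coracobrach_r', 'delt_scap_m_r', 'supraspi_r', 'infraspi_i_r', 'infraspi_s_r', 'teres_min_r'],
--     'delt_scap_m_r': ['pect_maj_thorax_m_r', 'lat_dors_m_r', 'teres_maj_r'],
--     'supraspi_r': ['pect_maj_thorax_m_r', 'lat_dors_m_r', 'teres_maj_r'],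
--     'pect_maj_thorax_m_r': ['delt_scap_m_r', 'supraspi_r'],
--     'subscap_s_r': ['infraspi_i_r', 'infraspi_s_r', 'teres_min_r'],
--     'subscap_i_r': ['infraspi_i_r', 'infraspi_s_r', 'teres_min_r'],
--     'infraspi_i_r': ['subscap_s_r', 'subscap_i_r', 'lat_dors_m_r', 'teres_maj_r'],
--     'infraspi_s_r': ['subscap_s_r', 'subscap_i_r', 'lat_dors_m_r', 'teres_maj_r'],
--     'teres_min_r': ['subscap_s_r', 'subscap_i_r', 'lat_dors_m_r', 'teres_maj_r'],
--     'bic_long_r': ['tri_long_r', 'tri_lat_r', 'pronator_teres_r'],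
--     'bic_brev_r': ['tri_long_r', 'tri_lat_r', 'pronator_teres_r'],
--     'brach_r': ['tri_long_r', 'tri_lat_r'],
--     'brachiorad_r': ['tri_long_r', 'tri_lat_r'],
--     'tri_long_r': ['bic_long_r', 'bic_brev_r', 'brach_r', 'brachiorad_r'],
--     'tri_lat_r': ['bic_long_r', 'bic_brev_r', 'brach_r', 'brachiorad_r'],
--     'supinator_r': ['pronator_teres_r'],
--     'pronator_teres_r': ['supinator_r', 'bic_long_r', 'bic_brev_r'],
--     'ext_carpi_rad_long_r': ['flex_carpi_rad_r', 'flex_carpi_ulna_r'],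
--     'ext_carpi_rad_brev_r': ['flex_carpi_rad_r', 'flex_carpi_ulna_r'],
--     'ext_carpi_ulna_r': ['flex_carpi_rad_r', 'flex_carpi_ulna_r'],
--     'flex_carpi_rad_r': ['ext_carpi_rad_long_r', 'ext_carpi_rad_brev_r', 'ext_carpi_ulna_r'],
--     'flex_carpi_ulna_r': ['ext_carpi_rad_long_r', 'ext_carpi_rad_brev_r', 'ext_carpi_ulna_r'],
-- }
--
-- def get_antagonist_muscles(muscle_name: str) -> List[str]:
--     """Get muscles that are antagonistic to the given muscle."""
--     return list(set(ANTAGONISTS.get(muscle_name, [])))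
-- ===== Notes on version B (the rewrite author's own statement) =====
-- stated objective: faster
-- what changed: A's per-call nested scans over SYNERGY_GROUPS and ANTAGONIST_PAIRS are replaced by a flat literal muscle->antagonists table, so each call is a single dict lookup plus the final list(set(...)).
import Mathlib
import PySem

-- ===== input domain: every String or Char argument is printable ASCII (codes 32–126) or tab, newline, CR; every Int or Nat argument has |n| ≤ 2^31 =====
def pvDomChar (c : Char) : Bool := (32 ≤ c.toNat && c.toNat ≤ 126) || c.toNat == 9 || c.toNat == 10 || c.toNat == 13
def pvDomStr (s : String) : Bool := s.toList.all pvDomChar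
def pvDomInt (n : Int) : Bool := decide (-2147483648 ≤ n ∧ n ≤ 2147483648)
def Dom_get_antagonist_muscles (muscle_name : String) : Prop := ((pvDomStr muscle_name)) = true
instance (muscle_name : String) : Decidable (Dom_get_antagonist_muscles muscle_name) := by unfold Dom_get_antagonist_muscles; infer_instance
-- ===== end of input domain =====

-- B replaces A's per-call nested scans of the synergy groups and antagonist pairs by a
-- flat literal muscle -> antagonists table looked up directly.

-- ===== PORT A =====
def pvSynergyGroups : List (String × List String) := [
  ("scapular_retractors", ["rhom_s_r", "rhom_i_r", "trap_scap_m_r"]),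
  ("scapular_protractors", ["ser_ant_i_r", "ser_ant_m_r", "ser_ant_s_r"]),
  ("scapular_elevators", ["trap_scap_s_r", "lev_scap_r"]),
  ("scapular_depressors", ["trap_scap_i_r", "lat_dors_i_r"]),
  ("shoulder_flexors", ["delt_clav_a_r", "pect_maj_clav_s_r", "coracobrach_r"]),
  ("shoulder_extensors", ["delt_scap_p_r", "lat_dors_m_r", "lat_dors_i_r", "teres_maj_r"]),
  ("shoulder_abductors", ["delt_scap_m_r", "supraspi_r"]),
  ("shoulder_adductors", ["pect_maj_thorax_m_r", "lat_dors_m_r", "teres_maj_r"]),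
  ("shoulder_internal_rotators", ["subscap_s_r", "subscap_i_r", "lat_dors_m_r", "teres_maj_r"]),
  ("shoulder_external_rotators", ["infraspi_i_r", "infraspi_s_r", "teres_min_r"]),
  ("elbow_flexors", ["bic_long_r", "bic_brev_r", "brach_r", "brachiorad_r"]),
  ("elbow_extensors", ["tri_long_r", "tri_lat_r"]),
  ("forearm_supinators", ["supinator_r", "bic_long_r", "bic_brev_r"]),
  ("forearm_pronators", ["pronator_teres_r"]),
  ("wrist_extensors", ["ext_carpi_rad_long_r", "ext_carpi_rad_brev_r", "ext_carpi_ulna_r"]),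
  ("wrist_flexors", ["flex_carpi_rad_r", "flex_carpi_ulna_r"])]

def pvAntagonistPairs : List (String × String) := [
  ("scapular_retractors", "scapular_protractors"),
  ("scapular_elevators", "scapular_depressors"),
  ("shoulder_flexors", "shoulder_extensors"),
  ("shoulder_abductors", "shoulder_adductors"),
  ("shoulder_internal_rotators", "shoulder_external_rotators"),
  ("elbow_flexors", "elbow_extensors"),
  ("forearm_supinators", "forearm_pronators"),
  ("wrist_extensors", "wrist_flexors")]

def pvSynergyDict : PySem.Dict String (List String) := PySem.Dict.ofList pvSynergyGroups

def get_antagonist_muscles (muscle_name : String) : List String :=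
  let muscle_groups : List String :=
    pvSynergyGroups.foldl (fun acc gm =>
      if gm.2.contains muscle_name then acc ++ [gm.1] else acc) []
  let antagonistic : List String :=
    muscle_groups.foldl (fun acc group =>
      pvAntagonistPairs.foldl (fun acc pair =>
        if group == pair.1 then
          (if pvSynergyDict.contains pair.2 then acc ++ pvSynergyDict.getD pair.2 [] else acc)
        else if group == pair.2 then
          (if pvSynergyDict.contains pair.1 then acc ++ pvSynergyDict.getD pair.1 [] else acc)
        else acc) acc) []
  PySem.Set.ofList antagonistic

-- ===== PORT B =====
-- B's literal module-level data: muscle -> its antagonist muscles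
def pvAntagonistTable : List (String × List String) := [
  ("rhom_s_r", ["ser_ant_i_r", "ser_ant_m_r", "ser_ant_s_r"]),
  ("rhom_i_r", ["ser_ant_i_r", "ser_ant_m_r", "ser_ant_s_r"]),
  ("trap_scap_m_r", ["ser_ant_i_r", "ser_ant_m_r", "ser_ant_s_r"]),
  ("ser_ant_i_r", ["rhom_s_r", "rhom_i_r", "trap_scap_m_r"]),
  ("ser_ant_m_r", ["rhom_s_r", "rhom_i_r", "trap_scap_m_r"]),
  ("ser_ant_s_r", ["rhom_s_r", "rhom_i_r", "trap_scap_m_r"]),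
  ("trap_scap_s_r", ["trap_scap_i_r", "lat_dors_i_r"]),
  ("lev_scap_r", ["trap_scap_i_r", "lat_dors_i_r"]),
  ("trap_scap_i_r", ["trap_scap_s_r", "lev_scap_r"]),
  ("lat_dors_i_r", ["trap_scap_s_r", "lev_scap_r", "delt_clav_a_r", "pect_maj_clav_s_r", "coracobrach_r"]),
  ("delt_clav_a_r", ["delt_scap_p_r", "lat_dors_m_r", "lat_dors_i_r", "teres_maj_r"]),
  ("pect_maj_clav_s_r", ["delt_scap_p_r", "lat_dors_m_r", "lat_dors_i_r", "teres_maj_r"]),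
  ("coracobrach_r", ["delt_scap_p_r", "lat_dors_m_r", "lat_dors_i_r", "teres_maj_r"]),
  ("delt_scap_p_r", ["delt_clav_a_r", "pect_maj_clav_s_r", "coracobrach_r"]),
  ("lat_dors_m_r", ["delt_clav_a_r", "pect_maj_clav_s_r", "coracobrach_r", "delt_scap_m_r", "supraspi_r", "infraspi_i_r", "infraspi_s_r", "teres_min_r"]),
  ("teres_maj_r", ["delt_clav_a_r", "pect_maj_clav_s_r", "coracobrach_r", "delt_scap_m_r", "supraspi_r", "infraspi_i_r", "infraspi_s_r", "teres_min_r"]),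
  ("delt_scap_m_r", ["pect_maj_thorax_m_r", "lat_dors_m_r", "teres_maj_r"]),
  ("supraspi_r", ["pect_maj_thorax_m_r", "lat_dors_m_r", "teres_maj_r"]),
  ("pect_maj_thorax_m_r", ["delt_scap_m_r", "supraspi_r"]),
  ("subscap_s_r", ["infraspi_i_r", "infraspi_s_r", "teres_min_r"]),
  ("subscap_i_r", ["infraspi_i_r", "infraspi_s_r", "teres_min_r"]),
  ("infraspi_i_r", ["subscap_s_r", "subscap_i_r", "lat_dors_m_r", "teres_maj_r"]),
  ("infraspi_s_r", ["subscap_s_r", "subscap_i_r", "lat_dors_m_r", "teres_maj_r"]),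
  ("teres_min_r", ["subscap_s_r", "subscap_i_r", "lat_dors_m_r", "teres_maj_r"]),
  ("bic_long_r", ["tri_long_r", "tri_lat_r", "pronator_teres_r"]),
  ("bic_brev_r", ["tri_long_r", "tri_lat_r", "pronator_teres_r"]),
  ("brach_r", ["tri_long_r", "tri_lat_r"]),
  ("brachiorad_r", ["tri_long_r", "tri_lat_r"]),
  ("tri_long_r", ["bic_long_r", "bic_brev_r", "brach_r", "brachiorad_r"]),
  ("tri_lat_r", ["bic_long_r", "bic_brev_r", "brach_r", "brachiorad_r"]),
  ("supinator_r", ["pronator_teres_r"]),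
  ("pronator_teres_r", ["supinator_r", "bic_long_r", "bic_brev_r"]),
  ("ext_carpi_rad_long_r", ["flex_carpi_rad_r", "flex_carpi_ulna_r"]),
  ("ext_carpi_rad_brev_r", ["flex_carpi_rad_r", "flex_carpi_ulna_r"]),
  ("ext_carpi_ulna_r", ["flex_carpi_rad_r", "flex_carpi_ulna_r"]),
  ("flex_carpi_rad_r", ["ext_carpi_rad_long_r", "ext_carpi_rad_brev_r", "ext_carpi_ulna_r"]),
  ("flex_carpi_ulna_r", ["ext_carpi_rad_long_r", "ext_carpi_rad_brev_r", "ext_carpi_ulna_r"])]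

def pvAntagonistDict : PySem.Dict String (List String) := PySem.Dict.ofList pvAntagonistTable

def get_antagonist_muscles_alt (muscle_name : String) : List String :=
  PySem.Set.ofList (pvAntagonistDict.getD muscle_name [])

-- ===== PRECONDITION & SPEC =====
def Spec_get_antagonist_muscles (muscle_name : String) (out : List String) : Prop := out = get_antagonist_muscles_alt muscle_name
instance (muscle_name : String) (out : List String) : Decidable (Spec_get_antagonist_muscles muscle_name out) := by unfold Spec_get_antagonist_muscles; infer_instance

-- ===== CLAIM =====
def Claim_equal_get_antagonist_muscles : Prop := ∀ (muscle_name : String), Dom_get_antagonist_muscles muscle_name → Spec_get_antagonist_muscles muscle_name (get_antagonist_muscles muscle_name)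

-- ===== LEMMAS AND PROOFS =====
def pvAllMuscles : List String := pvAntagonistTable.map Prod.fst

set_option maxRecDepth 8192 in
lemma eq_on_known : pvAllMuscles.all
    (fun s => get_antagonist_muscles s == get_antagonist_muscles_alt s) = true := by decide

lemma foldl_const {α β : Type} (init : α) (l : List β) :
    l.foldl (fun acc _ => acc) init = init := by
  induction l generalizing init with
  | nil => rfl
  | cons x xs ih => exact ih init

set_option maxRecDepth 8192 in
lemma eq_on_unknown (s : String) (h : s ∉ pvAllMuscles) :
    get_antagonist_muscles s = get_antagonist_muscles_alt s := by
  have hsub : ∀ gm ∈ pvSynergyGroups, ∀ x ∈ gm.2, x ∈ pvAllMuscles := by decide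
  have hkeys : ∀ k ∈ pvAntagonistDict.keys, k ∈ pvAllMuscles := by decide
  have hnone : pvAntagonistDict.get? s = none :=
    (PySem.Dict.get?_eq_none_iff_not_mem_keys _ s).mpr fun hk => h (hkeys s hk)
  have hgroups : pvSynergyGroups.foldl
      (fun (acc : List String) gm => if gm.2.contains s then acc ++ [gm.1] else acc) [] = [] := by
    have hcong := PySem.List.foldl_congr_mem (l := pvSynergyGroups) (init := ([] : List String))
      (f := fun acc gm => if gm.2.contains s then acc ++ [gm.1] else acc)
      (g := fun acc _ => acc)
      (by intro acc gm hgm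
          have hcf : s ∉ gm.2 := fun hx => h (hsub gm hgm s hx)
          simp [hcf])
    rw [hcong, foldl_const]
  have hA : get_antagonist_muscles s = [] := by
    unfold get_antagonist_muscles
    rw [hgroups]
    rfl
  have hB : get_antagonist_muscles_alt s = [] := by
    unfold get_antagonist_muscles_alt
    simp [PySem.Dict.getD, hnone]
  rw [hA, hB]

-- ===== VERDICT =====
theorem get_antagonist_muscles_spec : Claim_equal_get_antagonist_muscles := by
  intro s _
  unfold Spec_get_antagonist_muscles
  by_cases h : s ∈ pvAllMuscles
  · exact eq_of_beq (List.all_eq_true.mp eq_on_known s h)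
  · exact eq_on_unknown s h
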